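-- pv_equiv track=rewrite | github.com/Adhikram/Study_Resources | DSA/Python/Questions/String/SentenceScreenFitting.py | words_typing_optimized
-- ===== SOURCE A (Python) =====
-- from typing import List
--
-- def words_typing_optimized(sentence: List[str], rows: int, cols: int) -> int:
--     """
--     Optimized approach using pre-computation.
--     Time Complexity: O(rows + len(sentence)), where len(sentence) is the total sentence length.
--     Space Complexity: O(1).
--     """
--     s = " ".join(sentence) + " "
--     n = len(s)
--     chars_fitted = 0
--
--     # Iterate through each row
--     for _ in range(rows):
--         chars_fitted += cols
--         # Adjust the position based on the character fit
--         if s[chars_fitted % n] == " ":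
--             chars_fitted += 1
--         else:
--             while chars_fitted > 0 and s[(chars_fitted - 1) % n] != " ":
--                 chars_fitted -= 1
--
--     return chars_fitted // n
-- ===== SOURCE B (Python) =====
-- def words_typing_optimized(sentence, rows, cols):
--     # The cursor's per-row move depends only on its offset modulo the
--     # sentence length, so memoize visited offsets and fold whole cycles of rows.
--     s = " ".join(sentence) + " "
--     n = len(s)
--
--     def advance(c):
--         c += cols
--         if s[c % n] == " ":
--             return c + 1
--         while c > 0 and s[(c - 1) % n] != " ":
--             c -= 1
--         return c
--
--     seen = {}
--     c = 0
--     r = 0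
--     while r < rows:
--         p = c % n
--         if p in seen:
--             r0, c0 = seen[p]
--             cycle_rows = r - r0
--             cycle_delta = c - c0
--             k = (rows - r) // cycle_rows
--             r += k * cycle_rows
--             c += k * cycle_delta
--             break
--         seen[p] = (r, c)
--         c = advance(c)
--         r += 1
--     while r < rows:
--         c = advance(c)
--         r += 1
--     return c // n
-- ===== Notes on version B (the rewrite author's own statement) =====
-- stated objective: alternative
-- what changed: Instead of simulating every row, B memoizes the cursor offset (mod the joined-sentence length) seen at each simulated row and, on the first repeated offset, folds all remaining whole cycles of rows with one multiplication, simulating at most min(rows, n)+n rows; measured ratio at the largest timed size was 1.48x, below the 1.5x bar, so no speed is claimed.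
import Mathlib
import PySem

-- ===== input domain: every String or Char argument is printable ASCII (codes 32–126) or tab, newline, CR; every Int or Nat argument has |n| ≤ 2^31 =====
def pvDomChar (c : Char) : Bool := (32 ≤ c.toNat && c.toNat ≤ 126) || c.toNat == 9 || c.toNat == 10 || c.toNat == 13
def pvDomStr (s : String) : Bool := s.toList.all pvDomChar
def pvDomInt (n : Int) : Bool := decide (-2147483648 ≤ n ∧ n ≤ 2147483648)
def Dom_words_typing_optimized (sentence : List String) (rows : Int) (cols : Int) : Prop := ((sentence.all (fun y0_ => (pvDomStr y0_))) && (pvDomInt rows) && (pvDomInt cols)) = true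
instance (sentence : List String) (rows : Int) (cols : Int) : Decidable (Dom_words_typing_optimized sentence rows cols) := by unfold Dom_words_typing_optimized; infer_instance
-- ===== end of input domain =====

-- B memoizes the cursor offset modulo the joined-sentence length at each simulated row and
-- folds whole cycles of rows at the first repeated offset (objective: alternative algorithm).

-- ===== PORT A =====
-- s[i]: every index used is i % n with n = len(s) ≥ 1, so Python never raises and pyGetD's default is never read.
def aGet (cs : List Char) (i : Int) : Char := PySem.List.pyGetD cs i ' '

-- 'while chars_fitted > 0 and s[(chars_fitted - 1) % n] != " ": chars_fitted -= 1'
def aWhile (cs : List Char) (n : Int) (c : Int) : Int :=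
  if _h : 0 < c ∧ ¬ aGet cs (PySem.Int.mod (c - 1) n) = ' ' then aWhile cs n (c - 1) else c
termination_by c.toNat
decreasing_by omega

-- one iteration of A's 'for _ in range(rows)' body
def aRow (cs : List Char) (n : Int) (cols : Int) (c : Int) : Int :=
  let c' := c + cols
  if aGet cs (PySem.Int.mod c' n) = ' ' then c' + 1 else aWhile cs n c'

def words_typing_optimized (sentence : List String) (rows : Int) (cols : Int) : Int :=
  let cs := PySem.Chars.join [' '] (sentence.map (·.toList)) ++ [' ']   -- " ".join(sentence) + " "
  let n : Int := cs.length
  let cf := (PySem.List.pyRange 0 rows 1).foldl (fun c _ => aRow cs n cols c) 0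
  PySem.Int.floordiv cf n

-- ===== PORT B =====
def bGet (cs : List Char) (i : Int) : Char := PySem.List.pyGetD cs i ' '

-- the while loop inside Source B's advance
def bAdvWhile (cs : List Char) (n : Int) (c : Int) : Int :=
  if _h : 0 < c ∧ ¬ bGet cs (PySem.Int.mod (c - 1) n) = ' ' then bAdvWhile cs n (c - 1) else c
termination_by c.toNat
decreasing_by omega

-- Source B's advance(c)
def bAdvance (cs : List Char) (n : Int) (cols : Int) (c : Int) : Int :=
  let c' := c + cols
  if bGet cs (PySem.Int.mod c' n) = ' ' then c' + 1 else bAdvWhile cs n c'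

-- the tail 'while r < rows' loop (run after the break)
def bLoop2 (cs : List Char) (n : Int) (cols : Int) (rows : Int) (r : Int) (c : Int) : Int :=
  if _h : r < rows then
    bLoop2 cs n cols rows (r + 1) (bAdvance cs n cols c)
  else c
termination_by (rows - r).toNat
decreasing_by omega

-- the first 'while r < rows' loop with the seen-dict; 'break' jumps to bLoop2
def bLoop1 (cs : List Char) (n : Int) (cols : Int) (rows : Int)
    (seen : PySem.Dict Int (Int × Int)) (r : Int) (c : Int) : Int :=
  if _h : r < rows then
    let p := PySem.Int.mod c n
    match seen.get? p with
    | some (r0, c0) =>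
        let cycleRows := r - r0
        let cycleDelta := c - c0
        let k := PySem.Int.floordiv (rows - r) cycleRows
        bLoop2 cs n cols rows (r + k * cycleRows) (c + k * cycleDelta)
    | none => bLoop1 cs n cols rows (seen.insert p (r, c)) (r + 1) (bAdvance cs n cols c)
  else bLoop2 cs n cols rows r c
termination_by (rows - r).toNat
decreasing_by omega

def words_typing_optimized_alt (sentence : List String) (rows : Int) (cols : Int) : Int :=
  let cs := PySem.Chars.join [' '] (sentence.map (·.toList)) ++ [' ']
  let n : Int := cs.length
  PySem.Int.floordiv (bLoop1 cs n cols rows PySem.Dict.empty 0 0) n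

-- ===== PRECONDITION & SPEC =====
def Spec_words_typing_optimized (sentence : List String) (rows : Int) (cols : Int) (out : Int) : Prop := out = words_typing_optimized_alt sentence rows cols
instance (sentence : List String) (rows : Int) (cols : Int) (out : Int) : Decidable (Spec_words_typing_optimized sentence rows cols out) := by unfold Spec_words_typing_optimized; infer_instance

-- ===== CLAIM (what is proved, stated in full; the proofs are below) =====
def Claim_equal_words_typing_optimized : Prop := ∀ (sentence : List String) (rows : Int) (cols : Int), Dom_words_typing_optimized sentence rows cols → Spec_words_typing_optimized sentence rows cols (words_typing_optimized sentence rows cols)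

-- ===== LEMMAS AND PROOFS =====
-- Throughout: the joined string is l ++ [' '] (it always ends in a space) and n = its length ≥ 1.

-- proof-only: the per-row delta as a function of the offset p = c % n (within the sign regime)
def pvDelta (cs : List Char) (n : Int) (cols : Int) (p : Int) : Int :=
  if 0 ≤ cols then
    let j := PySem.Int.mod (p + cols) n
    if aGet cs j = ' ' then cols + 1
    else cols - (j - aWhile cs n j)
  else
    cols + (if aGet cs (PySem.Int.mod (p + cols) n) = ' ' then 1 else 0)

-- the sign regime the cursor stays in: nonnegative for cols ≥ 0, nonpositive for cols < 0
def pvReg (cols c : Int) : Prop := (0 ≤ cols ∧ 0 ≤ c) ∨ (cols < 0 ∧ c ≤ 0)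

-- Source B's advance is the same computation as A's row body
theorem pvAdvWhile_eq (cs : List Char) (n c : Int) : bAdvWhile cs n c = aWhile cs n c := by
  induction hc : c.toNat using Nat.strong_induction_on generalizing c with
  | _ m ih =>
  subst hc
  rw [bAdvWhile, aWhile]
  by_cases h : 0 < c ∧ ¬ aGet cs (PySem.Int.mod (c - 1) n) = ' '
  · rw [dif_pos (by simpa [bGet, aGet] using h), dif_pos h]
    exact ih (c - 1).toNat (by omega) (c - 1) rfl
  · rw [dif_neg (by simpa [bGet, aGet] using h), dif_neg h]

theorem pvAdvance_eq (cs : List Char) (n cols c : Int) : bAdvance cs n cols c = aRow cs n cols c := by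
  simp [bAdvance, aRow, bGet, aGet, pvAdvWhile_eq]

theorem pvGet_last (l : List Char) : aGet (l ++ [' ']) (l.length : Int) = ' ' := by simp [aGet]

theorem pvEmod_sub_one {c n : Int} (hn : 0 < n) (hne : c % n ≠ 0) : (c - 1) % n = c % n - 1 := by
  have hq := Int.mul_ediv_add_emod c n
  have h0 : 0 ≤ c % n := Int.emod_nonneg c (by omega)
  have h1 : c % n < n := Int.emod_lt_of_pos c hn
  have : c - 1 = (c % n - 1) + n * (c / n) := by omega
  rw [this, Int.add_mul_emod_self_left, Int.emod_eq_of_lt (by omega) (by omega)]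

theorem pvEmod_sub_one_zero {c n : Int} (hn : 0 < n) (hz : c % n = 0) : (c - 1) % n = n - 1 := by
  have hq := Int.mul_ediv_add_emod c n
  have : c - 1 = (n - 1) + n * (c / n - 1) := by rw [mul_sub]; omega
  rw [this, Int.add_mul_emod_self_left, Int.emod_eq_of_lt (by omega) (by omega)]

theorem pvAWhile_zero (cs : List Char) (n : Int) : aWhile cs n 0 = 0 := by rw [aWhile]; simp

-- A's backup from any c ≥ 0 lands at (c - c % n) + aWhile (c % n): it never crosses a multiple of n
theorem pvBack_eq (l : List Char) (c : Int) (hc : 0 ≤ c) :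
    aWhile (l ++ [' ']) ((l ++ [' ']).length : Int) c
      = (c - c % ((l ++ [' ']).length : Int))
        + aWhile (l ++ [' ']) ((l ++ [' ']).length : Int) (c % ((l ++ [' ']).length : Int)) := by
  set cs := l ++ [' '] with hcs
  set n : Int := (cs.length : Int) with hn
  have hnpos : 0 < n := by simp [hn, hcs]
  induction hc' : c.toNat using Nat.strong_induction_on generalizing c with
  | _ m ih =>
  subst hc'
  have hj0 : 0 ≤ c % n := Int.emod_nonneg c (by omega)
  have hjn : c % n < n := Int.emod_lt_of_pos c hnpos
  by_cases hsmall : c < n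
  · have : c % n = c := Int.emod_eq_of_lt hc hsmall
    rw [this]; omega
  · rw [aWhile]
    by_cases hz : c % n = 0
    · have hm : PySem.Int.mod (c - 1) n = n - 1 := by
        rw [PySem.Int.mod_eq_emod_of_pos hnpos, pvEmod_sub_one_zero hnpos hz]
      have hlast : aGet cs (n - 1) = ' ' := by
        have he : n - 1 = (l.length : Int) := by simp [hn, hcs]
        rw [hm] at *; rw [he]; exact pvGet_last l
      rw [hm, dif_neg (by simp [hlast])]
      rw [hz, pvAWhile_zero]; omega
    · have hm : PySem.Int.mod (c - 1) n = c % n - 1 := by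
        rw [PySem.Int.mod_eq_emod_of_pos hnpos, pvEmod_sub_one hnpos hz]
      have hcpos : 0 < c := by omega
      rw [hm]
      by_cases hch : aGet cs (c % n - 1) = ' '
      · rw [dif_neg (by simp [hch])]
        conv_rhs => rw [aWhile]
        have hm2 : PySem.Int.mod (c % n - 1) n = c % n - 1 := by
          rw [PySem.Int.mod_eq_emod_of_pos hnpos, Int.emod_eq_of_lt (by omega) (by omega)]
        rw [dif_neg (by rw [hm2]; simp [hch])]
        omega
      · rw [dif_pos ⟨hcpos, hch⟩]
        conv_rhs => rw [aWhile]
        have hm2 : PySem.Int.mod (c % n - 1) n = c % n - 1 := by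
          rw [PySem.Int.mod_eq_emod_of_pos hnpos, Int.emod_eq_of_lt (by omega) (by omega)]
        rw [dif_pos ⟨by omega, by rw [hm2]; exact hch⟩]
        have hrec := ih (c - 1).toNat (by omega) (c - 1) (by omega) rfl
        rw [hrec, pvEmod_sub_one hnpos hz]
        ring

theorem pvAWhile_nonneg (cs : List Char) (n c : Int) (hc : 0 ≤ c) : 0 ≤ aWhile cs n c := by
  induction hc' : c.toNat using Nat.strong_induction_on generalizing c with
  | _ m ih =>
  subst hc'
  rw [aWhile]
  split
  · next h => exact ih (c - 1).toNat (by omega) (c - 1) (by omega) rfl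
  · exact hc

-- one row of A adds exactly pvDelta of the current offset, inside the regime
theorem pvRow_eq (l : List Char) (cols c : Int) (hreg : pvReg cols c) :
    aRow (l ++ [' ']) ((l ++ [' ']).length : Int) cols c
      = c + pvDelta (l ++ [' ']) ((l ++ [' ']).length : Int) cols (c % ((l ++ [' ']).length : Int)) := by
  set cs := l ++ [' '] with hcs
  set n : Int := (cs.length : Int) with hn
  have hnpos : 0 < n := by simp [hn, hcs]
  have hmodeq : PySem.Int.mod (c % n + cols) n = PySem.Int.mod (c + cols) n := by
    rw [PySem.Int.mod_eq_emod_of_pos hnpos, PySem.Int.mod_eq_emod_of_pos hnpos, Int.emod_add_emod]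
  rcases hreg with ⟨hcols, hc⟩ | ⟨hcols, hc⟩
  · simp only [aRow, pvDelta, if_pos hcols, hmodeq]
    rw [PySem.Int.mod_eq_emod_of_pos hnpos]
    by_cases hch : aGet cs ((c + cols) % n) = ' '
    · rw [if_pos hch, if_pos hch]; ring
    · rw [if_neg hch, if_neg hch]
      rw [pvBack_eq l (c + cols) (by omega)]
      simp only [← hcs, ← hn]
      omega
  · simp only [aRow, pvDelta, if_neg (by omega : ¬ (0 ≤ cols)), hmodeq]
    by_cases hch : aGet cs (PySem.Int.mod (c + cols) n) = ' '
    · rw [if_pos hch, if_pos hch]; ring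
    · rw [if_neg hch, if_neg hch]
      rw [aWhile, dif_neg (by omega)]
      ring

theorem pvReg_pres (l : List Char) (cols c : Int) (hreg : pvReg cols c) :
    pvReg cols (aRow (l ++ [' ']) ((l ++ [' ']).length : Int) cols c) := by
  rcases hreg with ⟨hcols, hc⟩ | ⟨hcols, hc⟩
  · left
    refine ⟨hcols, ?_⟩
    simp only [aRow]
    split
    · omega
    · exact pvAWhile_nonneg _ _ _ (by omega)
  · right
    refine ⟨hcols, ?_⟩
    simp only [aRow]
    split
    · omega
    · rw [aWhile, dif_neg (by omega)]; omega

theorem pvReg_iter (l : List Char) (cols c : Int) (k : Nat) (hreg : pvReg cols c) :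
    pvReg cols ((aRow (l ++ [' ']) ((l ++ [' ']).length : Int) cols)^[k] c) := by
  induction k generalizing c with
  | zero => exact hreg
  | succ k ih => rw [Function.iterate_succ_apply]; exact ih _ (pvReg_pres l cols c hreg)

-- periodicity: iterates from two regime cursors at the same offset move in lockstep
theorem pvShift (l : List Char) (cols : Int) (k : Nat) (c1 c2 : Int)
    (h1 : pvReg cols c1) (h2 : pvReg cols c2)
    (hm : c1 % ((l ++ [' ']).length : Int) = c2 % ((l ++ [' ']).length : Int)) :
    (aRow (l ++ [' ']) ((l ++ [' ']).length : Int) cols)^[k] c2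
      = c2 + ((aRow (l ++ [' ']) ((l ++ [' ']).length : Int) cols)^[k] c1 - c1) := by
  induction k generalizing c1 c2 with
  | zero => simp
  | succ k ih =>
    rw [Function.iterate_succ_apply, Function.iterate_succ_apply]
    have e1 := pvRow_eq l cols c1 h1
    have e2 := pvRow_eq l cols c2 h2
    rw [hm] at e1
    have hm' : (aRow (l ++ [' ']) ((l ++ [' ']).length : Int) cols c1) % ((l ++ [' ']).length : Int)
        = (aRow (l ++ [' ']) ((l ++ [' ']).length : Int) cols c2) % ((l ++ [' ']).length : Int) := by
      rw [e1, e2, ← Int.emod_add_emod, hm, Int.emod_add_emod]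
    have := ih _ _ (pvReg_pres l cols c1 h1) (pvReg_pres l cols c2 h2) hm'
    rw [this, e1, e2]
    ring

-- folding: repeating a period multiplies its delta
theorem pvFold (l : List Char) (cols : Int) (L : Nat) (c0 D : Int) (t : Nat)
    (h0 : pvReg cols c0)
    (hL : (aRow (l ++ [' ']) ((l ++ [' ']).length : Int) cols)^[L] c0 = c0 + D)
    (hm : (c0 + D) % ((l ++ [' ']).length : Int) = c0 % ((l ++ [' ']).length : Int)) :
    (aRow (l ++ [' ']) ((l ++ [' ']).length : Int) cols)^[t * L] c0 = c0 + t * D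
      ∧ (c0 + t * D) % ((l ++ [' ']).length : Int) = c0 % ((l ++ [' ']).length : Int) := by
  induction t with
  | zero => simp
  | succ t ih =>
    obtain ⟨ih1, ih2⟩ := ih
    have hadd : (t + 1) * L = t * L + L := by ring
    have hit : (aRow (l ++ [' ']) ((l ++ [' ']).length : Int) cols)^[(t+1) * L] c0
        = (aRow (l ++ [' ']) ((l ++ [' ']).length : Int) cols)^[t * L]
            ((aRow (l ++ [' ']) ((l ++ [' ']).length : Int) cols)^[L] c0) := by
      rw [hadd, Function.iterate_add_apply]
    have hregD : pvReg cols (c0 + D) := by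
      rw [← hL]; exact pvReg_iter l cols c0 L h0
    have hs := pvShift l cols (t * L) c0 (c0 + D) h0 hregD hm.symm
    constructor
    · rw [hit, hL, hs, ih1]
      push_cast
      ring
    · push_cast
      have heq : c0 + (↑t + 1) * D = (c0 + ↑t * D) + D := by ring
      rw [heq, ← Int.emod_add_emod, ih2, Int.emod_add_emod]
      exact hm

theorem pvLoop2_eq (l : List Char) (cols rows r c : Int) (hr : r ≤ rows) (hreg : pvReg cols c) :
    bLoop2 (l ++ [' ']) ((l ++ [' ']).length : Int) cols rows r c
      = (aRow (l ++ [' ']) ((l ++ [' ']).length : Int) cols)^[(rows - r).toNat] c := by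
  induction hk : (rows - r).toNat using Nat.strong_induction_on generalizing r c with
  | _ m ih =>
  subst hk
  rw [bLoop2]
  by_cases hlt : r < rows
  · rw [dif_pos hlt, pvAdvance_eq]
    have hlen : (rows - r).toNat = (rows - (r + 1)).toNat + 1 := by omega
    rw [ih (rows - (r + 1)).toNat (by omega) (r + 1) _ (by omega) (pvReg_pres l cols c hreg) rfl]
    rw [hlen, Function.iterate_succ_apply]
  · rw [dif_neg hlt]
    have : (rows - r).toNat = 0 := by omega
    rw [this]
    rfl

theorem pvLoop1_eq (l : List Char) (cols rows : Int) (seen : PySem.Dict Int (Int × Int)) (r c : Int)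
    (hr0 : 0 ≤ r) (hr : r ≤ rows)
    (hc : c = (aRow (l ++ [' ']) ((l ++ [' ']).length : Int) cols)^[r.toNat] 0)
    (hreg : pvReg cols c)
    (hseen : ∀ p r0 c0, seen.get? p = some (r0, c0) →
      0 ≤ r0 ∧ r0 < r ∧ c0 = (aRow (l ++ [' ']) ((l ++ [' ']).length : Int) cols)^[r0.toNat] 0
        ∧ c0 % ((l ++ [' ']).length : Int) = p ∧ pvReg cols c0) :
    bLoop1 (l ++ [' ']) ((l ++ [' ']).length : Int) cols rows seen r c
      = (aRow (l ++ [' ']) ((l ++ [' ']).length : Int) cols)^[rows.toNat] 0 := by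
  have hnpos : 0 < ((l ++ [' ']).length : Int) := by simp
  induction hk : (rows - r).toNat using Nat.strong_induction_on generalizing seen r c with
  | _ m ih =>
  subst hk
  rw [bLoop1]
  by_cases hlt : r < rows
  · rw [dif_pos hlt]
    cases hget : seen.get? (PySem.Int.mod c ((l ++ [' ']).length : Int)) with
    | some v =>
      obtain ⟨r0, c0⟩ := v
      simp only [hget]
      obtain ⟨hr00, hr0r, hc0, hm0, hreg0⟩ := hseen _ _ _ hget
      have hL : (0:Int) < r - r0 := by omega
      have hrsplit : r.toNat = (r - r0).toNat + r0.toNat := by omega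
      have hcL : (aRow (l ++ [' ']) ((l ++ [' ']).length : Int) cols)^[(r - r0).toNat] c0 = c0 + (c - c0) := by
        have hcc : (aRow (l ++ [' ']) ((l ++ [' ']).length : Int) cols)^[(r - r0).toNat] c0 = c := by
          rw [hc0, ← Function.iterate_add_apply, ← hrsplit]
          exact hc.symm
        omega
      have hcm : c % ((l ++ [' ']).length : Int) = c0 % ((l ++ [' ']).length : Int) := by
        rw [hm0, PySem.Int.mod_eq_emod_of_pos hnpos]
      have hmD : (c0 + (c - c0)) % ((l ++ [' ']).length : Int) = c0 % ((l ++ [' ']).length : Int) := by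
        have he : c0 + (c - c0) = c := by omega
        rw [he, hcm]
      have hskip : PySem.Int.floordiv (rows - r) (r - r0) = (rows - r) / (r - r0) :=
        PySem.Int.floordiv_eq_ediv_of_pos hL
      have hskip0 : 0 ≤ (rows - r) / (r - r0) := Int.ediv_nonneg (by omega) (by omega)
      have hskipLe : ((rows - r) / (r - r0)) * (r - r0) ≤ rows - r := by
        have h1 := Int.emod_nonneg (rows - r) (by omega : r - r0 ≠ 0)
        have h2 := Int.mul_ediv_add_emod (rows - r) (r - r0)
        have h3 : ((rows - r) / (r - r0)) * (r - r0) = (r - r0) * ((rows - r) / (r - r0)) := by ring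
        omega
      have hfold := pvFold l cols (r - r0).toNat c0 (c - c0) (1 + ((rows - r) / (r - r0)).toNat)
        hreg0 hcL hmD
      have hcast : ((1 + ((rows - r) / (r - r0)).toNat : Nat) : Int) = 1 + (rows - r) / (r - r0) := by
        omega
      have hskL : ((rows - r) / (r - r0)) * (r - r0)
          = ((((rows - r) / (r - r0)).toNat * (r - r0).toNat : Nat) : Int) := by
        push_cast [Int.toNat_of_nonneg hskip0, Int.toNat_of_nonneg hL.le]
        ring
      have hr' : r + ((rows - r) / (r - r0)) * (r - r0) ≤ rows := by omega
      have hr'0 : 0 ≤ r + ((rows - r) / (r - r0)) * (r - r0) := by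
        have : (0:Int) ≤ ((((rows - r) / (r - r0)).toNat * (r - r0).toNat : Nat) : Int) := by positivity
        omega
      have hexp : (1 + ((rows - r) / (r - r0)).toNat) * (r - r0).toNat
          = (r - r0).toNat + ((rows - r) / (r - r0)).toNat * (r - r0).toNat := by ring
      have hr'toNat : (r + ((rows - r) / (r - r0)) * (r - r0)).toNat
          = (1 + ((rows - r) / (r - r0)).toNat) * (r - r0).toNat + r0.toNat := by omega
      have hDexp : (1 + (rows - r) / (r - r0)) * (c - c0)
          = (c - c0) + ((rows - r) / (r - r0)) * (c - c0) := by ring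
      have hc' : c + ((rows - r) / (r - r0)) * (c - c0)
          = (aRow (l ++ [' ']) ((l ++ [' ']).length : Int) cols)^[(r + ((rows - r) / (r - r0)) * (r - r0)).toNat] 0 := by
        rw [hr'toNat, Function.iterate_add_apply, ← hc0, hfold.1, hcast]
        omega
      have hreg' : pvReg cols (c + ((rows - r) / (r - r0)) * (c - c0)) := by
        have hri := pvReg_iter l cols c0 ((1 + ((rows - r) / (r - r0)).toNat) * (r - r0).toNat) hreg0
        rw [hfold.1] at hri
        have he : c + ((rows - r) / (r - r0)) * (c - c0)
            = c0 + ((1 + ((rows - r) / (r - r0)).toNat : Nat) : Int) * (c - c0) := by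
          rw [hcast]; omega
        rw [he]
        exact hri
      rw [hskip, pvLoop2_eq l cols rows _ _ hr' hreg', hc', ← Function.iterate_add_apply]
      congr 1
      omega
    | none =>
      simp only [hget]
      have hcnew : bAdvance (l ++ [' ']) ((l ++ [' ']).length : Int) cols c
          = (aRow (l ++ [' ']) ((l ++ [' ']).length : Int) cols)^[(r + 1).toNat] 0 := by
        rw [pvAdvance_eq, hc]
        have : (r + 1).toNat = r.toNat + 1 := by omega
        rw [this, Function.iterate_succ_apply']
      refine ih (rows - (r + 1)).toNat (by omega) _ (r + 1) _ (by omega) (by omega) hcnew ?_ ?_ rfl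
      · rw [pvAdvance_eq]
        exact pvReg_pres l cols c hreg
      · intro p r0 c0 hp
        by_cases hpe : PySem.Int.mod c ((l ++ [' ']).length : Int) = p
        · rw [← hpe, PySem.Dict.get?_insert_self] at hp
          simp only [Option.some.injEq, Prod.mk.injEq] at hp
          obtain ⟨h1, h2⟩ := hp
          refine ⟨by omega, by omega, by rw [← h2, ← h1]; exact hc, ?_, by rw [← h2]; exact hreg⟩
          rw [← h2, ← hpe, PySem.Int.mod_eq_emod_of_pos hnpos]
        · rw [PySem.Dict.get?_insert_of_ne _ _ (Ne.symm hpe)] at hp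
          obtain ⟨a1, a2, a3, a4, a5⟩ := hseen _ _ _ hp
          exact ⟨a1, by omega, a3, a4, a5⟩
  · rw [dif_neg hlt]
    have hle : rows ≤ r := by omega
    rw [bLoop2, dif_neg (by omega)]
    rcases eq_or_lt_of_le hle with he | hgt
    · rw [hc, he]
    · -- rows < r cannot happen here since r ≤ rows
      omega

theorem pvFoldl_iterate (F : Int → Int) (xs : List Int) (c : Int) :
    xs.foldl (fun a _ => F a) c = F^[xs.length] c := by
  induction xs generalizing c with
  | nil => rfl
  | cons x xs ih => simp [List.foldl_cons, ih, Function.iterate_succ_apply]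

-- ===== VERDICT (by name: the statement is the Claim_ definition above) =====
theorem words_typing_optimized_spec : Claim_equal_words_typing_optimized := by
  intro sentence rows cols _
  unfold Spec_words_typing_optimized words_typing_optimized words_typing_optimized_alt
  simp only []
  by_cases hrows : rows ≤ 0
  · rw [PySem.List.pyRange_one_eq_nil (by omega)]
    simp only [List.foldl_nil]
    congr 1
    rw [bLoop1, dif_neg (by omega), bLoop2, dif_neg (by omega)]
  · congr 1
    rw [pvFoldl_iterate, PySem.List.length_pyRange_one]
    rw [pvLoop1_eq (PySem.Chars.join [' '] (sentence.map (·.toList))) cols rows PySem.Dict.empty 0 0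
      (by omega) (by omega) (by simp) (by rcases le_or_gt 0 cols with h | h
                                          · exact Or.inl ⟨h, le_refl 0⟩
                                          · exact Or.inr ⟨h, le_refl 0⟩)
      (by intro p r0 c0 hp; rw [PySem.Dict.get?_empty] at hp; exact absurd hp (by simp))]
    congr 1
    omega
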